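-- pv_equiv track=rewrite | github.com/Mazharuddin-Mohammed/SemiPRO | scripts/test_visualization.py | extract_process_data
-- ===== SOURCE A (Python) =====
-- def extract_process_data(stdout):
--     """Extract process data from simulation output"""
--     data = {}
--     lines = stdout.split('\n')
--     for line in lines:
--         if 'completed' in line.lower():
--             data['status'] = 'completed'
--         if 'time' in line.lower():
--             data['execution_time'] = 'extracted'
--     return data
-- ===== SOURCE B (Python) =====
-- def extract_process_data(stdout):
--     """Extract process data from simulation output"""
--     s = stdout.lower()
--     data = {}
--     if 'completed' in s:
--         data['status'] = 'completed'
--     if 'time' in s: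
--         data['execution_time'] = 'extracted'
--     return data
-- ===== Notes on version B (the rewrite author's own statement) =====
-- stated objective: simpler
-- what changed: B drops the line-splitting loop and the per-line dict mutation: it lowercases stdout once and does two independent whole-string membership checks ('completed', 'time' contain no newline, so presence in some line equals presence in the whole text); Pre_ excludes inputs where both keywords occur but the first 'time' line strictly precedes the first 'completed' line, on which A's dict lists execution_time before status (accidental insertion order) while B always lists status first - the key/value mapping is identical there.
import Mathlib
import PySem

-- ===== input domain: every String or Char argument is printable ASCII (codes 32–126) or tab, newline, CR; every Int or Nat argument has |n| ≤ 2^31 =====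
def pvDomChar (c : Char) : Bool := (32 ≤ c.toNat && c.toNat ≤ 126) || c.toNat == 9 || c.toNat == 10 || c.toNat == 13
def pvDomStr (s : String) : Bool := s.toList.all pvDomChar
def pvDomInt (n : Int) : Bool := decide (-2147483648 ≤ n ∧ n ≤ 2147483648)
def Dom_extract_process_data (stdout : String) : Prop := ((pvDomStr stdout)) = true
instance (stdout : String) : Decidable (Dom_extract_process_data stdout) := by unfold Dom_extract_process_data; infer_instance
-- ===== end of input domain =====

-- B replaces A's per-line loop with dict mutation by two whole-string membership checks on the
-- lowercased text (objective: simpler; the keywords contain no newline). Equality of the returned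
-- association lists is proved on Pre_, which excludes only the inputs where A's dict insertion
-- order differs from B's (see the comment on Pre_); the key/value mapping agrees everywhere.

-- ===== PORT A =====
-- loop body of A's 'for line in lines' (dict mutation, both ifs in Python order)
def pvStepA (d : PySem.Dict String String) (line : String) : PySem.Dict String String :=
  let d1 := if PySem.Str.isIn "completed" (PySem.Str.lower line) then d.insert "status" "completed" else d
  if PySem.Str.isIn "time" (PySem.Str.lower line) then d1.insert "execution_time" "extracted" else d1

def extract_process_data (stdout : String) : List (String × String) :=
  let lines := (PySem.Str.split? stdout "\n").getD []
  (lines.foldl pvStepA PySem.Dict.empty).items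

-- ===== PORT B =====
def extract_process_data_alt (stdout : String) : List (String × String) :=
  let s := PySem.Str.lower stdout
  let d0 : PySem.Dict String String := PySem.Dict.empty
  let d1 := if PySem.Str.isIn "completed" s then d0.insert "status" "completed" else d0
  let d2 := if PySem.Str.isIn "time" s then d1.insert "execution_time" "extracted" else d1
  d2.items

-- ===== PRECONDITION & SPEC =====
-- Pre_ excludes exactly the inputs where both keywords occur but the first line containing 'time'
-- strictly precedes the first line containing 'completed': there A's dict lists execution_time
-- before status (accidental insertion order) while B lists status first — same key/value mapping.
def Pre_extract_process_data (stdout : String) : Prop :=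
  let lines := (PySem.Str.split? stdout "\n").getD []
  ((lines.findIdx? (fun l => PySem.Str.isIn "completed" (PySem.Str.lower l))).getD 0)
    ≤ ((lines.findIdx? (fun l => PySem.Str.isIn "time" (PySem.Str.lower l))).getD lines.length)
instance (stdout : String) : Decidable (Pre_extract_process_data stdout) := by
  unfold Pre_extract_process_data; infer_instance

def pvWitness_extract_process_data : String := "Process completed\nTime: 5"

def Spec_extract_process_data (stdout : String) (out : List (String × String)) : Prop :=
  out = extract_process_data_alt stdout
instance (stdout : String) (out : List (String × String)) : Decidable (Spec_extract_process_data stdout out) := by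
  unfold Spec_extract_process_data; infer_instance

-- ===== CLAIM (what is proved, stated in full; the proofs are below) =====
def Claim_equal_extract_process_data : Prop :=
  ∀ (stdout : String), Dom_extract_process_data stdout → Pre_extract_process_data stdout →
    Spec_extract_process_data stdout (extract_process_data stdout)

-- ===== LEMMAS AND PROOFS =====

-- structural version of str.split('\n') (proof-only)
def pvSplitNl : List Char → List Char → List (List Char)
  | pre, [] => [pre]
  | pre, c :: t => if c = '\n' then pre :: pvSplitNl [] t else pvSplitNl (pre ++ [c]) t

lemma pvGo : ∀ (fuel : Nat) (l cur : List Char) (acc : List (List Char)), l.length ≤ fuel →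
    PySem.Chars.splitOn.go ['\n'] fuel l cur acc = acc.reverse ++ pvSplitNl cur.reverse l := by
  intro fuel
  induction fuel with
  | zero =>
    intro l cur acc h
    have : l = [] := List.length_eq_zero_iff.mp (Nat.le_zero.mp h)
    subst this
    simp [PySem.Chars.splitOn.go, pvSplitNl]
  | succ n ih =>
    intro l cur acc h
    cases l with
    | nil => simp [PySem.Chars.splitOn.go, pvSplitNl]
    | cons c rest =>
      by_cases hc : c = '\n'
      · subst hc
        rw [PySem.Chars.splitOn.go]
        simp only [List.isPrefixOf, List.length_cons] at h ⊢
        rw [if_pos (by simp)]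
        simp only [List.length_nil, Nat.zero_add, List.drop_succ_cons, List.drop_zero]
        rw [ih rest [] (cur.reverse :: acc) (Nat.succ_le_succ_iff.mp h)]
        simp [pvSplitNl]
      · rw [PySem.Chars.splitOn.go]
        have : (['\n'] : List Char).isPrefixOf (c :: rest) = false := by
          simp [List.isPrefixOf]; exact fun hh => absurd hh.symm hc
        rw [if_neg (by simp [this])]
        simp only [List.length_cons] at h
        rw [ih rest (c :: cur) acc (Nat.succ_le_succ_iff.mp h)]
        simp [pvSplitNl, hc]

lemma pvSplitOn (cs : List Char) : PySem.Chars.splitOn cs ['\n'] = pvSplitNl [] cs := by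
  unfold PySem.Chars.splitOn
  rw [pvGo (cs.length + 1) cs [] [] (Nat.le_succ _)]
  simp

lemma pvPrefixSeg {sub xs ys : List Char} {m : Char} (hm : m ∉ sub) :
    sub <+: xs ++ m :: ys → sub <+: xs := by
  intro h
  have hlen : sub.length ≤ xs.length := by
    by_contra hlt
    push_neg at hlt
    rcases h with ⟨t, ht⟩
    have h1 : (xs ++ m :: ys)[xs.length]? = some m := by
      rw [List.getElem?_append_right (Nat.le_refl _)]
      simp
    have h2 : (sub ++ t)[xs.length]? = sub[xs.length]? := List.getElem?_append_left hlt
    rw [ht, h1] at h2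
    exact hm (List.mem_of_getElem? h2.symm)
  exact List.prefix_of_prefix_length_le h (List.prefix_append xs (m :: ys)) (by simpa using hlen)

lemma pvInfixSeg {sub : List Char} (xs ys : List Char) {m : Char} (hm : m ∉ sub) :
    sub <:+: xs ++ m :: ys ↔ sub <:+: xs ∨ sub <:+: ys := by
  induction xs with
  | nil =>
    simp only [List.nil_append]
    rw [List.infix_cons_iff]
    constructor
    · rintro (hp | hi)
      · cases sub with
        | nil => exact Or.inl (List.infix_refl _)
        | cons s sub' =>
          exfalso
          have : s = m := (List.cons_prefix_cons.mp hp).1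
          exact hm (this ▸ List.mem_cons_self)
      · exact Or.inr hi
    · rintro (hp | hi)
      · cases List.eq_nil_of_infix_nil hp; exact Or.inl List.nil_prefix
      · exact Or.inr hi
  | cons x xs' ih =>
    rw [List.cons_append, List.infix_cons_iff, List.infix_cons_iff]
    constructor
    · rintro (hp | hi)
      · exact Or.inl (Or.inl (pvPrefixSeg hm (by simpa using hp)))
      · rcases ih.mp hi with h | h
        · exact Or.inl (Or.inr h)
        · exact Or.inr h
    · rintro ((hp | hi) | hy)
      · exact Or.inl (hp.trans ⟨m :: ys, by simp⟩)
      · exact Or.inr (ih.mpr (Or.inl hi))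
      · exact Or.inr (ih.mpr (Or.inr hy))

lemma pvLowerCharNl (c : Char) : PySem.Chars.lowerChar c = '\n' ↔ c = '\n' := by
  unfold PySem.Chars.lowerChar PySem.Chars.isupper
  split_ifs with h
  · simp only [Bool.and_eq_true, decide_eq_true_eq, Char.le_def] at h
    have h1 : 65 ≤ c.toNat := h.1
    have h2 : c.toNat ≤ 90 := h.2
    constructor
    · intro he
      exfalso
      have hv : (c.toNat + 32).isValidChar := Or.inl (by omega)
      have := congrArg Char.toNat he
      rw [Char.toNat_ofNat, if_pos hv] at this
      have : c.toNat + 32 = 10 := this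
      omega
    · intro he
      subst he
      exfalso
      have : ('\n' : Char).toNat = 10 := by decide
      omega
  · exact Iff.rfl

lemma pvSplitLower : ∀ (cs pre : List Char),
    pvSplitNl (PySem.Chars.lower pre) (PySem.Chars.lower cs) = (pvSplitNl pre cs).map PySem.Chars.lower := by
  intro cs
  induction cs with
  | nil => intro pre; simp [pvSplitNl, PySem.Chars.lower]
  | cons c t ih =>
    intro pre
    simp only [PySem.Chars.lower, List.map_cons, pvSplitNl]
    by_cases hc : c = '\n'
    · rw [if_pos ((pvLowerCharNl c).mpr hc), if_pos hc]
      have := ih []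
      simp only [PySem.Chars.lower, List.map_nil] at this
      simp only [PySem.Chars.lower, List.map_cons, this]
    · rw [if_neg (fun hh => hc ((pvLowerCharNl c).mp hh)), if_neg hc]
      have := ih (pre ++ [c])
      simp only [PySem.Chars.lower, List.map_append, List.map_cons, List.map_nil] at this
      exact this

lemma pvInfixSplit {sub : List Char} (hnl : ('\n' : Char) ∉ sub) :
    ∀ (t pre : List Char), (∃ l ∈ pvSplitNl pre t, sub <:+: l) ↔ sub <:+: pre ++ t := by
  intro t
  induction t with
  | nil => intro pre; simp [pvSplitNl]
  | cons c t' ih =>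
    intro pre
    by_cases hc : c = '\n'
    · subst hc
      simp only [pvSplitNl, if_pos rfl]
      rw [pvInfixSeg pre t' hnl]
      constructor
      · rintro ⟨l, hl, hsub⟩
        rcases List.mem_cons.mp hl with rfl | hl'
        · exact Or.inl hsub
        · exact Or.inr (by simpa using (ih []).mp ⟨l, hl', hsub⟩)
      · rintro (h | h)
        · exact ⟨pre, List.mem_cons_self, h⟩
        · rcases (ih []).mpr (by simpa using h) with ⟨l, hl, hsub⟩
          exact ⟨l, List.mem_cons_of_mem _ hl, hsub⟩
    · simp only [pvSplitNl, if_neg hc]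
      rw [ih (pre ++ [c])]
      simp

lemma pvAnyIsIn (sub cs : List Char) (hnl : ('\n' : Char) ∉ sub) :
    (pvSplitNl [] cs).any (fun l => PySem.Chars.isIn sub (PySem.Chars.lower l))
      = PySem.Chars.isIn sub (PySem.Chars.lower cs) := by
  have hmap : pvSplitNl [] (PySem.Chars.lower cs) = (pvSplitNl [] cs).map PySem.Chars.lower := by
    have := pvSplitLower cs []
    simpa [PySem.Chars.lower] using this
  rcases h : PySem.Chars.isIn sub (PySem.Chars.lower cs) with _ | _
  · -- false: no line contains it
    rw [List.any_eq_false]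
    intro l hl
    intro hI
    have h1 : sub <:+: PySem.Chars.lower l := (PySem.Chars.isIn_iff_infix _ _).mp hI
    have h2 : (∃ l' ∈ pvSplitNl [] (PySem.Chars.lower cs), sub <:+: l') := by
      rw [hmap]
      exact ⟨PySem.Chars.lower l, List.mem_map_of_mem hl, h1⟩
    have := (pvInfixSplit hnl (PySem.Chars.lower cs) []).mp h2
    simp only [List.nil_append] at this
    rw [← PySem.Chars.isIn_iff_infix] at this
    rw [h] at this
    exact Bool.false_ne_true this
  · rw [List.any_eq_true]
    have h1 : sub <:+: [] ++ PySem.Chars.lower cs := by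
      simpa using (PySem.Chars.isIn_iff_infix _ _).mp h
    rcases (pvInfixSplit hnl (PySem.Chars.lower cs) []).mpr h1 with ⟨l', hl', hsub⟩
    rw [hmap] at hl'
    rcases List.mem_map.mp hl' with ⟨l, hl, rfl⟩
    exact ⟨l, hl, (PySem.Chars.isIn_iff_infix _ _).mpr hsub⟩

-- predicates of A's two ifs, on a line
def pvP (l : String) : Bool := PySem.Str.isIn "completed" (PySem.Str.lower l)
def pvQ (l : String) : Bool := PySem.Str.isIn "time" (PySem.Str.lower l)

def pvDs : PySem.Dict String String := PySem.Dict.mk [("status", "completed")]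
def pvDe : PySem.Dict String String := PySem.Dict.mk [("execution_time", "extracted")]
def pvDse : PySem.Dict String String := PySem.Dict.mk [("status", "completed"), ("execution_time", "extracted")]
def pvDes : PySem.Dict String String := PySem.Dict.mk [("execution_time", "extracted"), ("status", "completed")]

lemma pvStep_eval (d : PySem.Dict String String) (l : String) :
    pvStepA d l = if pvQ l then (if pvP l then d.insert "status" "completed" else d).insert "execution_time" "extracted"
                  else (if pvP l then d.insert "status" "completed" else d) := by
  unfold pvStepA pvP pvQ
  by_cases h1 : PySem.Str.isIn "completed" (PySem.Str.lower l) <;>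
    by_cases h2 : PySem.Str.isIn "time" (PySem.Str.lower l) <;> simp [h1, h2]

-- literal insert facts

lemma pvIns1 : pvDse.insert "status" "completed" = pvDse := by decide

lemma pvIns2 : pvDse.insert "execution_time" "extracted" = pvDse := by decide

lemma pvIns3 : pvDes.insert "status" "completed" = pvDes := by decide

lemma pvIns4 : pvDes.insert "execution_time" "extracted" = pvDes := by decide

lemma pvIns5 : pvDs.insert "status" "completed" = pvDs := by decide

lemma pvIns6 : pvDs.insert "execution_time" "extracted" = pvDse := by decide

lemma pvIns7 : pvDe.insert "execution_time" "extracted" = pvDe := by decide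

lemma pvIns8 : pvDe.insert "status" "completed" = pvDes := by decide

lemma pvIns9 : PySem.Dict.empty.insert "status" "completed" = pvDs := by decide

lemma pvIns10 : PySem.Dict.empty.insert "execution_time" "extracted" = pvDe := by decide

lemma pvFse : ∀ lines : List String, lines.foldl pvStepA pvDse = pvDse := by
  intro lines
  induction lines with
  | nil => rfl
  | cons l rest ih =>
    rw [List.foldl_cons, pvStep_eval]
    by_cases h1 : pvP l <;> by_cases h2 : pvQ l <;>
      simp [h1, h2, pvIns1, pvIns2, ih]

lemma pvFes : ∀ lines : List String, lines.foldl pvStepA pvDes = pvDes := by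
  intro lines
  induction lines with
  | nil => rfl
  | cons l rest ih =>
    rw [List.foldl_cons, pvStep_eval]
    by_cases h1 : pvP l <;> by_cases h2 : pvQ l <;>
      simp [h1, h2, pvIns3, pvIns4, ih]

lemma pvFs : ∀ lines : List String, lines.foldl pvStepA pvDs = if lines.any pvQ then pvDse else pvDs := by
  intro lines
  induction lines with
  | nil => rfl
  | cons l rest ih =>
    rw [List.foldl_cons, pvStep_eval]
    by_cases h1 : pvP l <;> by_cases h2 : pvQ l <;>
      simp [h1, h2, pvIns5, pvIns6, pvIns1, pvIns2, ih, pvFse]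

lemma pvFe : ∀ lines : List String, lines.foldl pvStepA pvDe = if lines.any pvP then pvDes else pvDe := by
  intro lines
  induction lines with
  | nil => rfl
  | cons l rest ih =>
    rw [List.foldl_cons, pvStep_eval]
    by_cases h1 : pvP l <;> by_cases h2 : pvQ l <;>
      simp [h1, h2, pvIns7, pvIns8, pvIns3, pvIns4, ih, pvFes]


lemma pvF0 : ∀ lines : List String,
    ((lines.findIdx? pvP).getD 0 ≤ (lines.findIdx? pvQ).getD lines.length) →
    (lines.foldl pvStepA PySem.Dict.empty).items
      = (if lines.any pvP then [("status", "completed")] else [])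
        ++ (if lines.any pvQ then [("execution_time", "extracted")] else []) := by
  intro lines
  induction lines with
  | nil => intro _; rfl
  | cons l rest ih =>
    intro hpre
    rw [List.foldl_cons, pvStep_eval]
    cases h1 : pvP l with
    | true =>
      cases h2 : pvQ l with
      | true =>
        simp only [h1, h2, if_true, pvIns9, pvIns6]
        rw [pvFse]
        simp [List.any_cons, h1, h2]
        rfl
      | false =>
        simp only [h1, h2, if_true, Bool.false_eq_true, if_false, pvIns9]
        rw [pvFs]
        cases h3 : rest.any pvQ <;> simp [h3, h1, h2] <;> rfl
    | false =>
      cases h2 : pvQ l with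
      | true =>
        have hnoP : (l :: rest).findIdx? pvP = none := by
          by_contra hsome
          rcases Option.ne_none_iff_exists'.mp hsome with ⟨c, hc⟩
          have hq : (l :: rest).findIdx? pvQ = some 0 := by
            rw [List.findIdx?_cons, if_pos h2]
          rw [hc, hq] at hpre
          simp at hpre
          rw [List.findIdx?_cons, if_neg (by simp [h1])] at hc
          rcases Option.map_eq_some_iff.mp hc with ⟨i, _, rfl⟩
          omega
        have hrestP : rest.any pvP = false := by
          rw [List.findIdx?_eq_none_iff] at hnoP
          rw [List.any_eq_false]
          intro x hx
          simp [hnoP x (List.mem_cons_of_mem _ hx)]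
        simp only [h1, h2, Bool.false_eq_true, if_false, if_true, pvIns10]
        rw [pvFe, hrestP]
        simp [List.any_cons, h1, h2, hrestP]
        rfl
      | false =>
        have hpre' : (rest.findIdx? pvP).getD 0 ≤ (rest.findIdx? pvQ).getD rest.length := by
          rw [List.findIdx?_cons, if_neg (by simp [h1]), List.findIdx?_cons, if_neg (by simp [h2])] at hpre
          rcases hP : rest.findIdx? pvP with _ | c <;> rcases hQ : rest.findIdx? pvQ with _ | t <;>
            rw [hP, hQ] at hpre <;> simp_all <;> omega
        simp only [h1, h2, Bool.false_eq_true, if_false]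
        rw [ih hpre']
        simp [h1, h2]

lemma pvSplitBridge (stdout : String) :
    (PySem.Str.split? stdout "\n").getD [] = (pvSplitNl [] stdout.toList).map String.ofList := by
  unfold PySem.Str.split? PySem.Chars.split?
  have : ("\n" : String).toList = ['\n'] := rfl
  rw [this]
  simp [pvSplitOn]

lemma pvAnyBridge (stdout : String) (sub : String) (hnl : ('\n' : Char) ∉ sub.toList) :
    ((pvSplitNl [] stdout.toList).map String.ofList).any
        (fun l => PySem.Str.isIn sub (PySem.Str.lower l))
      = PySem.Str.isIn sub (PySem.Str.lower stdout) := by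
  rw [List.any_map]
  have heq : ((fun l => PySem.Str.isIn sub (PySem.Str.lower l)) ∘ String.ofList)
      = fun l => PySem.Chars.isIn sub.toList (PySem.Chars.lower l) := by
    funext l
    simp [PySem.Str.isIn_eq, PySem.Str.toList_lower, String.toList_ofList]
  rw [heq, pvAnyIsIn sub.toList stdout.toList hnl]
  simp [PySem.Str.isIn_eq, PySem.Str.toList_lower]

-- ===== VERDICT (by name: the statement is the Claim_ definition above) =====
theorem extract_process_data_spec : Claim_equal_extract_process_data := by
  intro stdout _ hpre
  unfold Spec_extract_process_data extract_process_data extract_process_data_alt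
  have hpre' : ((((pvSplitNl [] stdout.toList).map String.ofList).findIdx? pvP).getD 0)
      ≤ ((((pvSplitNl [] stdout.toList).map String.ofList).findIdx? pvQ).getD
          (((pvSplitNl [] stdout.toList).map String.ofList).length)) := by
    unfold Pre_extract_process_data at hpre
    rw [pvSplitBridge] at hpre
    exact hpre
  rw [pvSplitBridge, pvF0 _ hpre']
  have hC : (List.map String.ofList (pvSplitNl [] stdout.toList)).any pvP
      = PySem.Str.isIn "completed" (PySem.Str.lower stdout) :=
    pvAnyBridge stdout "completed" (by decide)
  have hT : (List.map String.ofList (pvSplitNl [] stdout.toList)).any pvQ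
      = PySem.Str.isIn "time" (PySem.Str.lower stdout) :=
    pvAnyBridge stdout "time" (by decide)
  rw [hC, hT]
  cases h1 : PySem.Str.isIn "completed" (PySem.Str.lower stdout) <;>
    cases h2 : PySem.Str.isIn "time" (PySem.Str.lower stdout) <;>
      simp [PySem.Str.isIn_eq, PySem.Str.toList_lower] at h1 h2 <;>
        simp [h1, h2, pvIns9, pvIns10, pvIns6] <;> rfl
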